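-- pv_equiv track=rewrite | github.com/firstcarlos1/family-classifier | app - สำเนา (2).py | is_nuclear_family
-- ===== SOURCE A (Python) =====
-- def is_nuclear_family(members):
--     """ครอบครัวเดี่ยว: สามี+ภรรยา+ลูก"""
--     husband = False
--     wife = False
--     has_children = False
--
--     for member in members:
--         if member['relation'] == 'husband':
--             husband = True
--         elif member['relation'] == 'wife':
--             wife = True
--         elif member['relation'] == 'child':
--             has_children = True
--         elif member['relation'] in ['grandparent', 'mother-in-law', 'father']:
--             return False  # มีญาติอื่น = ไม่ใช่ครอบครัวเดี่ยว
--
--     return husband and wife and has_children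
-- ===== SOURCE B (Python) =====
-- def is_nuclear_family(members):
--     """ครอบครัวเดี่ยว: สามี+ภรรยา+ลูก"""
--     if any(m['relation'] in {'grandparent', 'mother-in-law', 'father'} for m in members):
--         return False
--     rels = {m['relation'] for m in members}
--     return {'husband', 'wife', 'child'} <= rels
-- ===== Notes on version B (the rewrite author's own statement) =====
-- stated objective: alternative
-- what changed: Replaces the three-flag loop with early return by two declarative passes: an any() scan for disqualifying relations, then a set comprehension with a subset test for husband+wife+child.
import Mathlib
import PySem

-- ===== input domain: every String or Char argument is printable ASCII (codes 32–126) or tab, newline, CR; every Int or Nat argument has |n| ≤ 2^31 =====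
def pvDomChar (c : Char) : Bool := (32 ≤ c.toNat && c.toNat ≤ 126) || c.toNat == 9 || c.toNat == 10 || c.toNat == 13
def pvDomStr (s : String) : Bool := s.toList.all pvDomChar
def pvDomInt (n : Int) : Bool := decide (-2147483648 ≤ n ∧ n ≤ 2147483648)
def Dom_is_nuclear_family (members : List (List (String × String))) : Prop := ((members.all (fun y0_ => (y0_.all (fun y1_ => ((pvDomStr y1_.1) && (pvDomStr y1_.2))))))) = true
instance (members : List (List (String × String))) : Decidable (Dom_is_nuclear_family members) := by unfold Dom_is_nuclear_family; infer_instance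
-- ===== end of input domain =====

-- B decides by an any() scan plus a set-subset test instead of A's flag loop; same KeyError behaviour.

-- ===== PORT A =====
-- flag loop with early return; m['relation'] ported as getD "" — exact on Pre_, where every
-- member the loop actually reaches has the 'relation' key.
def isNuclearGo (members : List (List (String × String))) (husband wife has_children : Bool) : Bool :=
  match members with
  | [] => husband && wife && has_children
  | m :: rest =>
    let r := (PySem.Dict.mk m).getD "relation" ""
    if r = "husband" then isNuclearGo rest true wife has_children
    else if r = "wife" then isNuclearGo rest husband true has_children
    else if r = "child" then isNuclearGo rest husband wife true
    else if r ∈ ["grandparent", "mother-in-law", "father"] then false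
    else isNuclearGo rest husband wife has_children

def is_nuclear_family (members : List (List (String × String))) : Bool :=
  isNuclearGo members false false false

-- ===== PORT B =====
-- any() scan for a disqualifying relation, then a set comprehension and a subset test
def is_nuclear_family_alt (members : List (List (String × String))) : Bool :=
  if members.any (fun m =>
      decide ((PySem.Dict.mk m).getD "relation" "" ∈ ["grandparent", "mother-in-law", "father"])) then
    false
  else
    let rels : PySem.Set String :=
      PySem.Set.ofList (members.map (fun m => (PySem.Dict.mk m).getD "relation" ""))
    PySem.Set.issubset (PySem.Set.ofList ["husband", "wife", "child"]) rels

-- ===== PRECONDITION & SPEC =====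
-- Pre_ is exactly where both Pythons return (they raise KeyError at the same member): either every
-- member has a 'relation' key, or a disqualifying relation occurs among the members before the
-- first one lacking the key (both scans early-exit False before raising).
def Pre_is_nuclear_family (members : List (List (String × String))) : Prop :=
  members.takeWhile (fun m => (PySem.Dict.mk m).contains "relation") = members
  ∨ ∃ m ∈ members.takeWhile (fun m => (PySem.Dict.mk m).contains "relation"),
      (PySem.Dict.mk m).getD "relation" "" ∈ ["grandparent", "mother-in-law", "father"]
instance (members : List (List (String × String))) : Decidable (Pre_is_nuclear_family members) := by
  unfold Pre_is_nuclear_family; infer_instance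

def pvWitness_is_nuclear_family : (List (List (String × String))) :=
  [[("relation", "husband")], [("relation", "wife")], [("relation", "child")]]

def Spec_is_nuclear_family (members : List (List (String × String))) (out : Bool) : Prop := out = is_nuclear_family_alt members
instance (members : List (List (String × String))) (out : Bool) : Decidable (Spec_is_nuclear_family members out) := by unfold Spec_is_nuclear_family; infer_instance

-- ===== CLAIM (what is proved, stated in full; the proofs are below) =====
def Claim_equal_is_nuclear_family : Prop := ∀ (members : List (List (String × String))), Dom_is_nuclear_family members → Pre_is_nuclear_family members → Spec_is_nuclear_family members (is_nuclear_family members)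

-- ===== LEMMAS AND PROOFS =====

-- the Boolean formula both sides reduce to, over the list of looked-up relations
def nuclearF (members : List (List (String × String))) (h w c : Bool) : Bool :=
  let L := members.map (fun m => (PySem.Dict.mk m).getD "relation" "")
  ((h || L.contains "husband") && (w || L.contains "wife") && (c || L.contains "child"))
    && (!L.contains "grandparent" && !L.contains "mother-in-law" && !L.contains "father")

-- characterisation of A's loop (unconditional: both sides treat a missing key as the inert "")
theorem isNuclearGo_eq (members : List (List (String × String))) (h w c : Bool) :
    isNuclearGo members h w c = nuclearF members h w c := by
  induction members generalizing h w c with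
  | nil => simp [isNuclearGo, nuclearF]
  | cons m rest ih =>
    simp only [isNuclearGo, nuclearF, List.map_cons, List.contains_cons]
    by_cases h1 : (PySem.Dict.mk m).getD "relation" "" = "husband"
    · rw [if_pos h1, ih, nuclearF]; simp [h1]
    rw [if_neg h1]
    by_cases h2 : (PySem.Dict.mk m).getD "relation" "" = "wife"
    · rw [if_pos h2, ih, nuclearF]; simp [h2]
    rw [if_neg h2]
    by_cases h3 : (PySem.Dict.mk m).getD "relation" "" = "child"
    · rw [if_pos h3, ih, nuclearF]; simp [h3]
    rw [if_neg h3]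
    by_cases h4 : (PySem.Dict.mk m).getD "relation" "" ∈ ["grandparent", "mother-in-law", "father"]
    · rw [if_pos h4]
      simp only [List.mem_cons, List.not_mem_nil, or_false] at h4
      rcases h4 with h4 | h4 | h4 <;> simp [h4]
    · rw [if_neg h4, ih, nuclearF]
      simp only [List.mem_cons, List.not_mem_nil, or_false, not_or] at h4
      obtain ⟨h5, h6, h7⟩ := h4
      have e1 : ("husband" == (PySem.Dict.mk m).getD "relation" "") = false :=
        beq_eq_false_iff_ne.mpr (Ne.symm h1)
      have e2 : ("wife" == (PySem.Dict.mk m).getD "relation" "") = false :=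
        beq_eq_false_iff_ne.mpr (Ne.symm h2)
      have e3 : ("child" == (PySem.Dict.mk m).getD "relation" "") = false :=
        beq_eq_false_iff_ne.mpr (Ne.symm h3)
      have e5 : ("grandparent" == (PySem.Dict.mk m).getD "relation" "") = false :=
        beq_eq_false_iff_ne.mpr (Ne.symm h5)
      have e6 : ("mother-in-law" == (PySem.Dict.mk m).getD "relation" "") = false :=
        beq_eq_false_iff_ne.mpr (Ne.symm h6)
      have e7 : ("father" == (PySem.Dict.mk m).getD "relation" "") = false :=
        beq_eq_false_iff_ne.mpr (Ne.symm h7)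
      simp [e1, e2, e3, e5, e6, e7]

-- characterisation of B (unconditional)
theorem alt_eq (members : List (List (String × String))) :
    is_nuclear_family_alt members = nuclearF members false false false := by
  simp only [is_nuclear_family_alt, nuclearF]
  cases hany : members.any (fun m =>
      decide ((PySem.Dict.mk m).getD "relation" "" ∈ ["grandparent", "mother-in-law", "father"])) with
  | true =>
    rw [if_pos rfl]
    obtain ⟨x, hx, hbx⟩ := List.any_eq_true.mp hany
    simp only [decide_eq_true_eq, List.mem_cons, List.not_mem_nil, or_false] at hbx
    have hm : ∀ s, (PySem.Dict.mk x).getD "relation" "" = s →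
        (members.map (fun m => (PySem.Dict.mk m).getD "relation" "")).contains s = true := by
      intro s hs
      simpa [List.contains_eq_mem] using List.mem_map.mpr ⟨x, hx, hs⟩
    rcases hbx with hbx | hbx | hbx <;> rw [hm _ hbx] <;> simp
  | false =>
    rw [if_neg Bool.false_ne_true]
    have hno : ∀ x ∈ members, ¬ (PySem.Dict.mk x).getD "relation" "" ∈ ["grandparent", "mother-in-law", "father"] := by
      intro x hx
      simpa using (List.any_eq_false.mp hany) x hx
    rw [Bool.eq_iff_iff]
    simp only [Bool.and_eq_true, PySem.Set.issubset_iff, PySem.Set.mem_ofList,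
      List.contains_eq_mem, List.mem_cons, List.not_mem_nil, Bool.not_eq_eq_eq_not,
      Bool.not_true, decide_eq_true_eq, decide_eq_false_iff_not, Bool.false_or, or_false]
    constructor
    · intro hs
      refine ⟨⟨⟨hs _ (Or.inl rfl), hs _ (Or.inr (Or.inl rfl))⟩, hs _ (Or.inr (Or.inr rfl))⟩,
        ⟨?_, ?_⟩, ?_⟩ <;>
        · intro hx
          obtain ⟨x, hxm, hxe⟩ := List.mem_map.mp hx
          exact hno x hxm (by simp [hxe])
    · rintro ⟨⟨⟨g1, g2⟩, g3⟩, -⟩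
      rintro x (rfl | rfl | rfl)
      · exact g1
      · exact g2
      · exact g3

-- ===== VERDICT (by name: the statement is the Claim_ definition above) =====
theorem is_nuclear_family_spec : Claim_equal_is_nuclear_family := by
  intro members _ _
  unfold Spec_is_nuclear_family is_nuclear_family
  rw [isNuclearGo_eq, alt_eq]
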